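-- pv_equiv track=rewrite | github.com/xriva/coding-contest | google/kickstart/2020/D/alienpiano/alien.py | solve
-- ===== SOURCE A (Python) =====
-- def solve(K,A):
--     B = [A[0]]
--     for i in range(1,K):
--         if A[i]!=A[i-1]:
--             B.append(A[i])
--
--     N = len(B)
--     if N<=4:
--         return 0
--
--     prevUD = B[1]>B[0]
--     cnt=2
--
--     result = 0
--     for i in range(2,N):
--         ud = B[i]>B[i-1]
--         if ud == prevUD:
--             cnt+=1
--         else:
--             result+=(cnt-1)//4
--             prevUD = ud
--             cnt=2
--
--     result += (cnt-1)//4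
--
--     return result
-- ===== SOURCE B (Python) =====
-- def solve(K, A):
--     # Per-press counting: instead of measuring monotone runs and dividing their
--     # lengths by 4, count one forced restart each time the streak of
--     # same-direction moves reaches a multiple of 4 (a hand has only 4 fingers).
--     result = 0
--     streak = 0
--     prevd = None
--     last = A[0]
--     for i in range(1, K):
--         x = A[i]
--         if x != last:
--             d = x > last
--             streak = streak + 1 if d == prevd else 1
--             if streak % 4 == 0:
--                 result += 1
--             prevd = d
--             last = x
--     return result
-- ===== Notes on version B (the rewrite author's own statement) =====
-- stated objective: alternative
-- what changed: Replaced A's two-stage run-length scheme (materialize the dedup list, measure each maximal monotone run, add (len-1)//4 per run with a final flush and an N<=4 guard) by per-press event counting: one pass that tracks the streak of consecutive same-direction moves and adds 1 exactly when the streak reaches a multiple of 4, so no intermediate list, no division, no post-loop flush and no guard.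
import Mathlib
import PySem

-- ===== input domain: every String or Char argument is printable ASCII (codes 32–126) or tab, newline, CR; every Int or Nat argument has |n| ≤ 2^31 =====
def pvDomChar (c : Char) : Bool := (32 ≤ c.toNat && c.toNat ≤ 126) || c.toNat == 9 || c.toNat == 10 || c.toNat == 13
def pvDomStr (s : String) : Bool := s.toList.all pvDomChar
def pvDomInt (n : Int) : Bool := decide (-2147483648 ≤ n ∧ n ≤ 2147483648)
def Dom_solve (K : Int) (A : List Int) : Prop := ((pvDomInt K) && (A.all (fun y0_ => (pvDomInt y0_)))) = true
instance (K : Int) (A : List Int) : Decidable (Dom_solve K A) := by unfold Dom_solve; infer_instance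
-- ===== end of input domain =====

-- B counts one forced restart per press whose same-direction streak hits a
-- multiple of 4, in one pass with O(1) state, instead of A's dedup list plus
-- per-run (len-1)//4 aggregation; same return value on every admitted input.

-- ===== PORT A =====
def solve (K : Int) (A : List Int) : Int :=
  let B := (PySem.List.pyRange 1 K 1).foldl
    (fun B i =>
      if PySem.List.pyGetD A i 0 ≠ PySem.List.pyGetD A (i-1) 0
      then B ++ [PySem.List.pyGetD A i 0] else B)
    [PySem.List.pyGetD A 0 0]
  let N : Int := B.length
  if N ≤ 4 then 0
  else
    let prevUD := decide (PySem.List.pyGetD B 0 0 < PySem.List.pyGetD B 1 0)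
    let s := (PySem.List.pyRange 2 N 1).foldl
      (fun (s : Bool × Int × Int) i =>
        let ud := decide (PySem.List.pyGetD B (i-1) 0 < PySem.List.pyGetD B i 0)
        if ud == s.1 then (s.1, s.2.1 + 1, s.2.2)
        else (ud, 2, s.2.2 + PySem.Int.floordiv (s.2.1 - 1) 4))
      (prevUD, 2, 0)
    s.2.2 + PySem.Int.floordiv (s.2.1 - 1) 4

-- ===== PORT B =====
-- one loop step of Source B (state: last, result, streak, prevd)
def bstep (st : Int × Int × Int × Option Bool) (x : Int) : Int × Int × Int × Option Bool :=
  if x ≠ st.1 then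
    let d := decide (st.1 < x)
    let streak := match st.2.2.2 with
      | some pd => if d == pd then st.2.2.1 + 1 else 1
      | none => 1
    (x, st.2.1 + (if PySem.Int.mod streak 4 = 0 then 1 else 0), streak, some d)
  else st

def solve_alt (K : Int) (A : List Int) : Int :=
  ((PySem.List.pyRange 1 K 1).foldl
    (fun st i => bstep st (PySem.List.pyGetD A i 0))
    (PySem.List.pyGetD A 0 0, 0, 0, none)).2.1

-- ===== PRECONDITION & SPEC =====
-- Pre_ excludes exactly the inputs where the Python A raises IndexError:
-- empty A (A[0]) or K > len(A) (A[i] in the loop).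
def Pre_solve (K : Int) (A : List Int) : Prop := A ≠ [] ∧ K ≤ (A.length : Int)
instance (K : Int) (A : List Int) : Decidable (Pre_solve K A) := by unfold Pre_solve; infer_instance
def pvWitness_solve : Int × List Int := (6, [1, 2, 3, 4, 5, 6])
def Spec_solve (K : Int) (A : List Int) (out : Int) : Prop := out = solve_alt K A
instance (K : Int) (A : List Int) (out : Int) : Decidable (Spec_solve K A out) := by unfold Spec_solve; infer_instance

-- ===== CLAIM (what is proved, stated in full; the proofs are below) =====
def Claim_equal_solve : Prop := ∀ (K : Int) (A : List Int), Dom_solve K A → Pre_solve K A → Spec_solve K A (solve K A)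

-- ===== LEMMAS AND PROOFS =====

-- consecutive-dedup of a list, relative to a previous value
def dedupT : Int → List Int → List Int
  | _, [] => []
  | last, x :: t => if x = last then dedupT x t else x :: dedupT x t

-- generic "for i in range(j, len xs): step(s, xs[i-1], xs[i])" as structural recursion
def adjFold {σ : Type} (step : σ → Int → Int → σ) : Int → List Int → σ → σ
  | _, [], s => s
  | prev, x :: t, s => adjFold step x t (step s prev x)

-- A's first-loop step and second-loop step as adjFold steps
def stepApp (s : List Int) (p x : Int) : List Int := if x ≠ p then s ++ [x] else s
def stepA (s : Bool × Int × Int) (p x : Int) : Bool × Int × Int :=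
  if decide (p < x) == s.1 then (s.1, s.2.1 + 1, s.2.2)
  else (decide (p < x), 2, s.2.2 + PySem.Int.floordiv (s.2.1 - 1) 4)

-- Source B as structural recursion producing the final answer
def bref : Int → Int → Int → Option Bool → List Int → Int
  | _, res, _, _, [] => res
  | last, res, s, dir, x :: t =>
    if x = last then bref last res s dir t
    else
      let d := decide (last < x)
      let s' := match dir with
        | some pd => if d == pd then s + 1 else 1
        | none => 1
      bref x (res + (if PySem.Int.mod s' 4 = 0 then 1 else 0)) s' (some d) t

-- A's second loop as structural recursion producing the final answer
def aref2 : Int → Bool → Int → Int → List Int → Int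
  | _, _, cnt, res, [] => res + PySem.Int.floordiv (cnt - 1) 4
  | prev, pud, cnt, res, x :: t =>
    if decide (prev < x) == pud then aref2 x pud (cnt + 1) res t
    else aref2 x (decide (prev < x)) 2 (res + PySem.Int.floordiv (cnt - 1) 4) t

lemma floordiv_small_four (n : Int) (h0 : 0 ≤ n) (h4 : n < 4) :
    PySem.Int.floordiv n 4 = 0 := by
  rw [PySem.Int.floordiv_eq_iff_of_pos (by norm_num)]
  omega

-- streak arithmetic: ⌊(s+1)/4⌋ = ⌊s/4⌋ + [4 ∣ s+1]  for 0 ≤ s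
lemma floordiv_succ_four (s : Int) (h : 0 ≤ s) :
    PySem.Int.floordiv (s + 1) 4
      = PySem.Int.floordiv s 4 + (if PySem.Int.mod (s + 1) 4 = 0 then 1 else 0) := by
  rw [PySem.Int.floordiv_eq_ediv_of_pos (by norm_num),
    PySem.Int.floordiv_eq_ediv_of_pos (by norm_num),
    PySem.Int.mod_eq_emod_of_pos (by norm_num)]
  split_ifs with h4 <;> omega

lemma mod_four_ne_zero (s : Int) (h1 : 1 ≤ s) (h3 : s ≤ 3) :
    PySem.Int.mod s 4 ≠ 0 := by
  rw [PySem.Int.mod_eq_emod_of_pos (by norm_num)]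
  omega

-- index-form adjacent fold equals adjFold
lemma foldl_pyRange_adj {σ : Type} (step : σ → Int → Int → σ) (xs : List Int) :
    ∀ (n j : Nat) (init : σ), 1 ≤ j → xs.length = j + n →
    (PySem.List.pyRange (j : Int) (xs.length : Int) 1).foldl
      (fun s i => step s (PySem.List.pyGetD xs (i - 1) 0) (PySem.List.pyGetD xs i 0)) init
    = adjFold step (xs.getD (j - 1) 0) (xs.drop j) init := by
  intro n
  induction n with
  | zero =>
    intro j init hj hlen
    rw [PySem.List.pyRange_one_eq_nil (by exact_mod_cast (by omega : xs.length ≤ j))]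
    rw [List.drop_eq_nil_of_le (by omega)]
    rfl
  | succ n ih =>
    intro j init hj hlen
    have hjlt : j < xs.length := by omega
    rw [PySem.List.pyRange_one_cons (by exact_mod_cast hjlt)]
    rw [List.foldl_cons]
    have h1 : ((j : Int) - 1) = ((j - 1 : Nat) : Int) := by omega
    have h2 : ((j : Int) + 1) = ((j + 1 : Nat) : Int) := by push_cast; ring
    rw [h1, PySem.List.pyGetD_natCast, PySem.List.pyGetD_natCast, h2,
      ih (j + 1) _ (by omega) (by omega)]
    rw [List.drop_eq_getElem_cons hjlt]
    simp only [adjFold]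
    simp [List.getD, hjlt]

-- A's first loop builds the consecutive-dedup list
lemma adjFold_append (T : List Int) : ∀ (prev : Int) (acc : List Int),
    adjFold stepApp prev T acc = acc ++ dedupT prev T := by
  induction T with
  | nil => intro prev acc; simp [adjFold, dedupT]
  | cons x t ih =>
    intro prev acc
    by_cases h : x = prev
    · subst h
      simp [adjFold, dedupT, stepApp, ih]
    · simp [adjFold, dedupT, stepApp, h, ih, List.append_assoc]

-- finalization of B's fold
lemma bref_foldl (T : List Int) : ∀ (st : Int × Int × Int × Option Bool),
    (T.foldl bstep st).2.1 = bref st.1 st.2.1 st.2.2.1 st.2.2.2 T := by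
  induction T with
  | nil => intro st; simp [bref]
  | cons x t ih =>
    rintro ⟨l, r, c, d⟩
    rw [List.foldl_cons, ih]
    by_cases h : x = l
    · simp [bref, bstep, h]
    · cases d <;> simp only [bref, bstep, h, ne_eq, not_false_iff, if_true, if_false]

-- finalization of A's second loop
lemma aref2_adjFold (E : List Int) (prev : Int) (st : Bool × Int × Int) :
    (adjFold stepA prev E st).2.2 + PySem.Int.floordiv ((adjFold stepA prev E st).2.1 - 1) 4
    = aref2 prev st.1 st.2.1 st.2.2 E := by
  induction E generalizing prev st with
  | nil => simp [adjFold, aref2]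
  | cons x t ih =>
    obtain ⟨u, c, r⟩ := st
    simp only [adjFold, aref2, stepA]
    split_ifs <;> rw [ih]

-- B's pass is insensitive to consecutive duplicates
lemma bref_dedupT (T : List Int) : ∀ (last res s : Int) (dir : Option Bool),
    bref last res s dir T = bref last res s dir (dedupT last T) := by
  induction T with
  | nil => intro last res s dir; rfl
  | cons x t ih =>
    intro last res s dir
    by_cases h : x = last
    · subst h
      simp only [bref, dedupT]
      exact ih x res s dir
    · simp only [bref, dedupT, if_neg h]
      exact ih ..

lemma chain_dedupT (T : List Int) : ∀ (last : Int),
    List.IsChain (· ≠ ·) (last :: dedupT last T) := by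
  induction T with
  | nil => intro last; simp [dedupT]
  | cons x t ih =>
    intro last
    by_cases h : x = last
    · subst h; simpa [dedupT] using ih x
    · simp only [dedupT, if_neg h]
      rw [List.isChain_cons_cons]
      exact ⟨fun h' => h h'.symm, ih x⟩

-- on duplicate-free runs with a direction set, B's incremental count equals A's
-- run aggregation, up to the part of the current run B has already counted
lemma bref_eq_aref2 (E : List Int) : ∀ (prev res s : Int) (pd : Bool),
    1 ≤ s → List.IsChain (· ≠ ·) (prev :: E) →
    bref prev res s (some pd) E
      = aref2 prev pd (s + 1) (res - PySem.Int.floordiv s 4) E := by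
  induction E with
  | nil =>
    intro prev res s pd hs _
    simp only [bref, aref2]
    rw [show (s + 1 - 1 : Int) = s from by ring]
    ring
  | cons x t ih =>
    intro prev res s pd hs hch
    rw [List.isChain_cons_cons] at hch
    obtain ⟨hne, hch⟩ := hch
    have hx : x ≠ prev := fun h => hne h.symm
    simp only [bref, aref2, if_neg hx]
    by_cases hd : decide (prev < x) = pd
    · simp only [hd, beq_self_eq_true, if_true]
      rw [ih x _ (s + 1) pd (by omega) hch]
      rw [floordiv_succ_four s (by omega)]
      ring_nf
    · have hd' : (decide (prev < x) == pd) = false := by simp [hd]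
      simp only [hd', Bool.false_eq_true, if_false]
      rw [ih x _ 1 (decide (prev < x)) le_rfl hch]
      rw [show (s + 1 - 1 : Int) = s from by ring]
      rw [if_neg (mod_four_ne_zero 1 le_rfl (by norm_num)),
        show PySem.Int.floordiv 1 4 = 0 from floordiv_small_four 1 (by norm_num) (by norm_num)]
      ring_nf
  
-- short duplicate-free runs contribute nothing
lemma bref_short (E : List Int) : ∀ (last res s : Int) (dir : Option Bool),
    List.IsChain (· ≠ ·) (last :: E) → 0 ≤ s → s + (E.length : Int) ≤ 3 →
    bref last res s dir E = res := by
  induction E with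
  | nil => intros; rfl
  | cons x t ih =>
    intro last res s dir hch h0 h3
    rw [List.isChain_cons_cons] at hch
    obtain ⟨hne, hch⟩ := hch
    have hx : x ≠ last := fun h => hne h.symm
    simp only [List.length_cons] at h3
    push_cast at h3
    simp only [bref, if_neg hx]
    cases dir with
    | none =>
      rw [if_neg (mod_four_ne_zero 1 le_rfl (by norm_num)), add_zero]
      exact ih x res 1 _ hch (by norm_num) (by omega)
    | some pd =>
      by_cases hd : (decide (last < x) == pd) = true
      · simp only [hd, if_true]
        rw [if_neg (mod_four_ne_zero (s + 1) (by omega) (by omega)), add_zero]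
        exact ih x res (s + 1) _ hch (by omega) (by omega)
      · simp only [Bool.not_eq_true] at hd
        simp only [hd, Bool.false_eq_true, if_false]
        rw [if_neg (mod_four_ne_zero 1 le_rfl (by norm_num)), add_zero]
        exact ih x res 1 _ hch (by norm_num) (by omega)

lemma pyGetD_take (A : List Int) (k : Nat) (hk : k ≤ A.length) (i : Int)
    (h0 : 0 ≤ i) (hik : i < (k : Int)) :
    PySem.List.pyGetD (A.take k) i 0 = PySem.List.pyGetD A i 0 := by
  rw [PySem.List.pyGetD_eq_getElem (A.take k) 0 h0 (by simp [List.length_take]; omega),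
      PySem.List.pyGetD_eq_getElem A 0 h0 (by omega)]
  exact List.getElem_take

-- ===== VERDICT (by name: the statement is the Claim_ definition above) =====
theorem solve_spec : Claim_equal_solve := by
  intro K A _ hpre
  obtain ⟨hne, hK⟩ := hpre
  unfold Spec_solve
  by_cases hK1 : K ≤ 1
  · simp only [solve, solve_alt, PySem.List.pyRange_one_eq_nil hK1, List.foldl_nil]
    rw [if_pos (by norm_num)]
  · rw [not_le] at hK1
    simp only [solve, solve_alt]
    have hkA : K.toNat ≤ A.length := by omega
    have hk2 : 2 ≤ K.toNat := by omega
    have hxlen : (A.take K.toNat).length = K.toNat := by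
      simp [List.length_take]; omega
    have hcast : ((A.take K.toNat).length : Int) = K := by rw [hxlen]; omega
    have hcong : ∀ (i : Int), 1 ≤ i → i < ((A.take K.toNat).length : Int) →
        PySem.List.pyGetD A i 0 = PySem.List.pyGetD (A.take K.toNat) i 0 ∧
        PySem.List.pyGetD A (i - 1) 0 = PySem.List.pyGetD (A.take K.toNat) (i - 1) 0 := by
      intro i h1 h2
      rw [hcast] at h2
      constructor
      · exact (pyGetD_take A K.toNat hkA i (by omega) (by omega)).symm
      · exact (pyGetD_take A K.toNat hkA (i - 1) (by omega) (by omega)).symm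
    have h00 : (A.take K.toNat).getD 0 0 = PySem.List.pyGetD A 0 0 := by
      rw [← PySem.List.pyGetD_zero (A.take K.toNat) 0,
        pyGetD_take A K.toNat hkA 0 le_rfl (by omega), PySem.List.pyGetD_zero]
    -- A's first loop builds the dedup list
    have hA : List.foldl
        (fun B i => if PySem.List.pyGetD A i 0 ≠ PySem.List.pyGetD A (i - 1) 0
          then B ++ [PySem.List.pyGetD A i 0] else B)
        [PySem.List.pyGetD A 0 0] (PySem.List.pyRange 1 K)
        = PySem.List.pyGetD A 0 0 ::
            dedupT (PySem.List.pyGetD A 0 0) ((A.take K.toNat).drop 1) := by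
      conv_lhs => rw [← hcast]
      rw [PySem.List.foldl_congr_mem _ _
        (fun s i => if PySem.List.pyGetD (A.take K.toNat) i 0 ≠ PySem.List.pyGetD (A.take K.toNat) (i - 1) 0
          then s ++ [PySem.List.pyGetD (A.take K.toNat) i 0] else s) _
        (by
          intro acc i hi
          rw [PySem.List.mem_pyRange_one] at hi
          rw [(hcong i hi.1 hi.2).1, (hcong i hi.1 hi.2).2])]
      have h := foldl_pyRange_adj stepApp (A.take K.toNat) (K.toNat - 1) 1
        [PySem.List.pyGetD A 0 0] le_rfl (by omega)
      simp only [Nat.cast_one, stepApp] at h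
      rw [h]
      rw [adjFold_append]
      simp only [Nat.sub_self]
      rw [h00]
      rfl
    -- B's loop over A equals the list fold over the taken tail
    have hB : List.foldl (fun st i => bstep st (PySem.List.pyGetD A i 0))
        (PySem.List.pyGetD A 0 0, 0, 0, none) (PySem.List.pyRange 1 K)
        = List.foldl bstep (PySem.List.pyGetD A 0 0, 0, 0, none) ((A.take K.toNat).drop 1) := by
      conv_lhs => rw [← hcast]
      rw [PySem.List.foldl_congr_mem _ _
        (fun st i => bstep st (PySem.List.pyGetD (A.take K.toNat) i 0)) _
        (by
          intro acc i hi
          rw [PySem.List.mem_pyRange_one] at hi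
          rw [(hcong i hi.1 hi.2).1])]
      have h := PySem.List.foldl_pyRange_pyGetD' (A.take K.toNat) 0 bstep
        (PySem.List.pyGetD A 0 0, 0, 0, none) (a := 1) (by norm_num)
      rw [h]
      norm_num
    rw [hA, hB]
    have hbf := bref_foldl ((A.take K.toNat).drop 1)
      (PySem.List.pyGetD A 0 0, 0, 0, none)
    simp only at hbf
    rw [hbf]
    rw [bref_dedupT]
    have hch := chain_dedupT ((A.take K.toNat).drop 1) (PySem.List.pyGetD A 0 0)
    generalize hEq : dedupT (PySem.List.pyGetD A 0 0) ((A.take K.toNat).drop 1) = E at hch ⊢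
    cases E with
    | nil =>
      rw [if_pos (by norm_num)]
      rfl
    | cons e E' =>
      rw [List.isChain_cons_cons] at hch
      obtain ⟨hne0, hch⟩ := hch
      have he0 : e ≠ PySem.List.pyGetD A 0 0 := fun h => hne0 h.symm
      have hBstep : bref (PySem.List.pyGetD A 0 0) 0 0 none (e :: E')
          = bref e (0 + (if PySem.Int.mod 1 4 = 0 then 1 else 0)) 1
              (some (decide (PySem.List.pyGetD A 0 0 < e))) E' := by
        simp only [bref, if_neg he0]
      rw [hBstep, if_neg (mod_four_ne_zero 1 le_rfl (by norm_num)), add_zero]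
      by_cases hsm : E'.length ≤ 2
      · rw [if_pos (by simp [List.length_cons]; omega)]
        exact (bref_short E' e 0 1 _ hch (by norm_num) (by omega)).symm
      · rw [if_neg (by simp [List.length_cons]; omega)]
        have hD := foldl_pyRange_adj stepA
          (PySem.List.pyGetD A 0 0 :: e :: E') E'.length 2
          (decide (PySem.List.pyGetD (PySem.List.pyGetD A 0 0 :: e :: E') 0 0 <
            PySem.List.pyGetD (PySem.List.pyGetD A 0 0 :: e :: E') 1 0), 2, 0)
          (by omega) (by simp; omega)
        simp only [Nat.cast_ofNat, stepA] at hD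
        rw [hD]
        have hd1 : (PySem.List.pyGetD A 0 0 :: e :: E').getD (2 - 1) 0 = e := rfl
        rw [hd1]
        rw [show List.drop 2 (PySem.List.pyGetD A 0 0 :: e :: E') = E' from rfl]
        rw [PySem.List.pyGetD_zero_cons]
        rw [show PySem.List.pyGetD (PySem.List.pyGetD A 0 0 :: e :: E') 1 0 = e from by
          rw [show (1 : Int) = ((1 : Nat) : Int) from by norm_num, PySem.List.pyGetD_natCast]; rfl]
        rw [aref2_adjFold]
        rw [bref_eq_aref2 E' e 0 1 (decide (PySem.List.pyGetD A 0 0 < e)) le_rfl hch]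
        rw [show PySem.Int.floordiv 1 4 = 0 from floordiv_small_four 1 (by norm_num) (by norm_num)]
        norm_num
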